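-- pv_equiv track=rewrite | github.com/dabearrr/practice | 12_hash_tables.py | letterFromMagazine
-- ===== SOURCE A (Python) =====
-- def letterFromMagazine(l, m):
-- 	ht = {}
--
-- 	for c in l:
-- 		if c not in ht:
-- 			ht[c] = 1
-- 		else:
-- 			ht[c] += 1
--
-- 	for c in m:
-- 		if c in ht:
-- 			ht[c] -= 1
--
-- 	for key in ht:
-- 		if ht[key] > 0:
-- 			return False
--
-- 	return True
-- ===== SOURCE B (Python) =====
-- def letterFromMagazine(l, m):
--     ls = sorted(l)
--     ms = sorted(m)
--     i = 0
--     for c in ls: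
--         while i < len(ms) and ms[i] < c:
--             i += 1
--         if i == len(ms) or ms[i] != c:
--             return False
--         i += 1
--     return True
-- ===== Notes on version B (the rewrite author's own statement) =====
-- stated objective: alternative
-- what changed: Replaces A's hash-table count/decrement/scan passes with sort-then-merge: sort both strings and walk them with a two-pointer scan, advancing the magazine pointer past smaller letters and failing when the needed letter is absent; no frequency table exists at any point.
import Mathlib
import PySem

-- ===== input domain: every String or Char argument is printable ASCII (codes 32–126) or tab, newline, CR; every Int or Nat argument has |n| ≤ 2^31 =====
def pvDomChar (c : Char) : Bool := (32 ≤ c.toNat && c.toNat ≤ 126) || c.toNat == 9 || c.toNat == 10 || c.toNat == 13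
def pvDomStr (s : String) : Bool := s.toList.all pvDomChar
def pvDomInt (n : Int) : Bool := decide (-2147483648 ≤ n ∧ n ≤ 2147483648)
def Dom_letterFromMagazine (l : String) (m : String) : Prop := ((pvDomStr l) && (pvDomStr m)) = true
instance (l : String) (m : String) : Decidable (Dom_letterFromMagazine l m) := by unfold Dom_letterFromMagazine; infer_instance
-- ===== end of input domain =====

-- B replaces A's dict passes by sort-both-then-two-pointer-merge (alternative algorithm, same results).


-- ===== PORT A =====
-- loop 1: for c in l: if c not in ht: ht[c] = 1 else: ht[c] += 1
-- loop 2: for c in m: if c in ht: ht[c] -= 1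
-- loop 3: for key in ht: if ht[key] > 0: return False; return True
def letterFromMagazine (l : String) (m : String) : Bool :=
  let ht1 : PySem.Dict Char Int :=
    l.toList.foldl
      (fun d c => if !d.contains c then d.insert c 1 else d.insert c (d.getD c 0 + 1))
      PySem.Dict.empty
  let ht2 : PySem.Dict Char Int :=
    m.toList.foldl
      (fun d c => if d.contains c then d.insert c (d.getD c 0 - 1) else d)
      ht1
  ht2.keys.all (fun key => !decide (ht2.getD key 0 > 0))

-- ===== PORT B =====
-- ls = sorted(l); ms = sorted(m); i = 0
-- for c in ls:  while i < len(ms) and ms[i] < c: i += 1;  if i == len(ms) or ms[i] != c: return False;  i += 1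
-- return True
-- (the pointer i only moves forward, so it is carried as the remaining suffix ms[i:])
def lfmSkip (c : Char) : List Char → List Char
  | [] => []
  | b :: t => if b < c then lfmSkip c t else b :: t

def lfmGo : List Char → List Char → Bool
  | [], _ => true
  | c :: rest, ms =>
    match lfmSkip c ms with
    | [] => false
    | b :: t => if b = c then lfmGo rest t else false

def letterFromMagazine_alt (l : String) (m : String) : Bool :=
  lfmGo (PySem.List.sorted l.toList (fun x => x) false)
        (PySem.List.sorted m.toList (fun x => x) false)

-- ===== PRECONDITION & SPEC =====
def Spec_letterFromMagazine (l : String) (m : String) (out : Bool) : Prop := out = letterFromMagazine_alt l m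
instance (l : String) (m : String) (out : Bool) : Decidable (Spec_letterFromMagazine l m out) := by unfold Spec_letterFromMagazine; infer_instance

-- ===== CLAIM (what is proved, stated in full; the proofs are below) =====
def Claim_equal_letterFromMagazine : Prop := ∀ (l : String) (m : String), Dom_letterFromMagazine l m → Spec_letterFromMagazine l m (letterFromMagazine l m)

-- ===== LEMMAS AND PROOFS =====

-- A's first loop builds exactly Counter(l): the "c not in ht" branch inserts 1, which equals getD+1 there.
lemma pv_loop1_eq_counter (ls : List Char) :
    ls.foldl (fun d c => if !d.contains c then d.insert c 1 else d.insert c (d.getD c 0 + 1))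
      PySem.Dict.empty = PySem.Dict.counter ls := by
  have hfun : (fun (d : PySem.Dict Char Int) c =>
      if !d.contains c then d.insert c 1 else d.insert c (d.getD c 0 + 1)) =
      (fun d c => d.insert c (d.getD c 0 + 1)) := by
    funext d c
    by_cases h : d.contains c = true
    · simp [h]
    · have hnm : c ∉ d.keys := by
        simpa [PySem.Dict.contains_eq_decide_mem_keys] using h
      have hnone : d.get? c = none := (PySem.Dict.get?_eq_none_iff_not_mem_keys d c).mpr hnm
      have : d.getD c 0 = 0 := by
        show (d.get? c).getD 0 = 0
        rw [hnone]; rfl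
      simp [h, this]
  rw [hfun, PySem.Dict.foldl_insert_getD_add_one_eq_counter]

-- A's second loop never changes the key set.
lemma pv_loop2_mem (ms : List Char) (d : PySem.Dict Char Int) (x : Char) :
    x ∈ (ms.foldl (fun d c => if d.contains c then d.insert c (d.getD c 0 - 1) else d) d).keys
      ↔ x ∈ d.keys := by
  induction ms generalizing d with
  | nil => rfl
  | cons a t ih =>
    rw [List.foldl_cons, ih]
    by_cases h : d.contains a = true
    · have ha : a ∈ d.keys := by
        simpa [PySem.Dict.contains_eq_decide_mem_keys] using h
      simp only [h, if_true, PySem.Dict.mem_keys_insert]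
      constructor
      · rintro (rfl | hx) <;> [exact ha; exact hx]
      · exact Or.inr
    · simp [h]

-- On a key already present, A's second loop subtracts the number of its occurrences in m.
lemma pv_loop2_getD (ms : List Char) (d : PySem.Dict Char Int) (x : Char) (hx : x ∈ d.keys) :
    (ms.foldl (fun d c => if d.contains c then d.insert c (d.getD c 0 - 1) else d) d).getD x 0
      = d.getD x 0 - (ms.count x : Int) := by
  induction ms generalizing d with
  | nil => simp
  | cons a t ih =>
    rw [List.foldl_cons]
    by_cases h : d.contains a = true
    · have hx' : x ∈ (d.insert a (d.getD a 0 - 1)).keys :=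
        (PySem.Dict.mem_keys_insert d a x _).mpr (Or.inr hx)
      rw [if_pos h, ih _ hx']
      by_cases hxa : x = a
      · subst hxa
        rw [PySem.Dict.getD_insert_self]
        simp
        omega
      · rw [PySem.Dict.getD_insert_of_ne _ _ _ hxa]
        have : (a :: t).count x = t.count x := by
          simp [Ne.symm hxa]
        rw [this]
    · rw [if_neg h, ih _ hx]
      have hna : a ∉ d.keys := by
        simpa [PySem.Dict.contains_eq_decide_mem_keys] using h
      have hxa : x ≠ a := fun hh => hna (hh ▸ hx)
      have : (a :: t).count x = t.count x := by
        simp [Ne.symm hxa]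
      rw [this]

-- so A returns true iff every letter occurs in m at least as often as in l.
lemma pv_A_iff (l m : String) :
    letterFromMagazine l m = true ↔ ∀ c, l.toList.count c ≤ m.toList.count c := by
  unfold letterFromMagazine
  simp only [pv_loop1_eq_counter, List.all_eq_true]
  constructor
  · intro hA c
    by_cases hc : c ∈ l.toList
    · have hkeys : c ∈ (PySem.Dict.counter l.toList).keys := by
        rw [PySem.Dict.keys_counter]; exact (PySem.Set.mem_ofList _ _).mpr hc
      have hmem := (pv_loop2_mem m.toList _ c).mpr hkeys
      have := hA c hmem
      rw [pv_loop2_getD _ _ _ hkeys, PySem.Dict.getD_counter] at this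
      simp only [Bool.not_eq_eq_eq_not, Bool.not_true, decide_eq_false_iff_not, not_lt] at this
      omega
    · have : l.toList.count c = 0 := List.count_eq_zero.mpr hc
      omega
  · intro hB k hk
    have hkeys : k ∈ (PySem.Dict.counter l.toList).keys := (pv_loop2_mem _ _ _).mp hk
    have := hB k
    rw [pv_loop2_getD _ _ _ hkeys, PySem.Dict.getD_counter]
    simp only [Bool.not_eq_eq_eq_not, Bool.not_true, decide_eq_false_iff_not, not_lt]
    omega

-- skipping letters below c never drops an occurrence of any x ≥ c.
lemma pv_skip_count (c x : Char) (hcx : c ≤ x) : ∀ ms : List Char,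
    (lfmSkip c ms).count x = ms.count x := by
  intro ms
  induction ms with
  | nil => rfl
  | cons b t ih =>
    rw [lfmSkip]
    by_cases hb : b < c
    · have hbx : b ≠ x := fun h => absurd (h ▸ hb) (not_lt.mpr hcx)
      rw [if_pos hb, ih, List.count_cons_of_ne hbx]
    · rw [if_neg hb]

lemma pv_skip_pairwise (c : Char) (ms : List Char) (hm : ms.Pairwise (· ≤ ·)) :
    (lfmSkip c ms).Pairwise (· ≤ ·) := by
  induction ms with
  | nil => exact hm
  | cons b t ih =>
    rw [lfmSkip]
    by_cases hb : b < c
    · rw [if_pos hb]; exact ih (List.Pairwise.of_cons hm)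
    · rw [if_neg hb]; exact hm

lemma pv_skip_head_ge (c : Char) : ∀ (ms : List Char) (b : Char) (t : List Char),
    lfmSkip c ms = b :: t → c ≤ b := by
  intro ms
  induction ms with
  | nil => intro b t h; exact absurd h (by simp [lfmSkip])
  | cons b0 t0 ih =>
    intro b t h
    rw [lfmSkip] at h
    by_cases hb : b0 < c
    · rw [if_pos hb] at h; exact ih b t h
    · rw [if_neg hb] at h
      cases h; exact not_lt.mp hb

-- a sorted list headed by c contains nothing below c.
lemma pv_count_lt_head (c x : Char) (rest : List Char)
    (h : (c :: rest).Pairwise (· ≤ ·)) (hx : x < c) : (c :: rest).count x = 0 := by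
  refine List.count_eq_zero.mpr ?_
  intro hmem
  rcases List.mem_cons.mp hmem with rfl | hmem'
  · exact absurd hx (lt_irrefl _)
  · exact absurd hx (not_lt.mpr ((List.pairwise_cons.mp h).1 x hmem'))

-- the two-pointer merge on sorted lists decides exactly multiset containment.
lemma pv_go_iff : ∀ (ls : List Char), ∀ (ms : List Char),
    ls.Pairwise (· ≤ ·) → ms.Pairwise (· ≤ ·) →
    (lfmGo ls ms = true ↔ ∀ x, ls.count x ≤ ms.count x) := by
  intro ls
  induction ls with
  | nil => intro ms _ _; simp [lfmGo]
  | cons c rest ih =>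
    intro ms hl hm
    rw [lfmGo]
    rcases hms' : lfmSkip c ms with _ | ⟨b, t⟩
    · constructor
      · intro h; exact absurd h (by simp)
      · intro h
        have h0 : ms.count c = 0 := by
          rw [← pv_skip_count c c le_rfl ms, hms']; rfl
        have := h c
        rw [h0, List.count_cons_self] at this
        omega
    · have hcb : c ≤ b := pv_skip_head_ge c ms b t hms'
      have hsp : (b :: t).Pairwise (· ≤ ·) := hms' ▸ pv_skip_pairwise c ms hm
      show (if b = c then lfmGo rest t else false) = true ↔ ∀ x, (c :: rest).count x ≤ ms.count x
      by_cases hbc : b = c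
      · subst hbc
        rw [if_pos rfl]
        rw [ih t (List.Pairwise.of_cons hl) (List.Pairwise.of_cons hsp)]
        constructor
        · intro h x
          by_cases hx : x < b
          · rw [pv_count_lt_head b x rest hl hx]
            exact Nat.zero_le _
          · have hxcnt : ms.count x = (b :: t).count x := by
              rw [← pv_skip_count b x (not_lt.mp hx) ms, hms']
            rw [hxcnt]
            by_cases hxb : x = b
            · rw [hxb, List.count_cons_self, List.count_cons_self]
              exact Nat.succ_le_succ (h b)
            · rw [List.count_cons_of_ne (Ne.symm hxb), List.count_cons_of_ne (Ne.symm hxb)]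
              exact h x
        · intro h x
          by_cases hx : x < b
          · have hz := pv_count_lt_head b x rest hl hx
            have hbx : b ≠ x := fun e => absurd (e ▸ hx) (lt_irrefl x)
            rw [List.count_cons_of_ne hbx] at hz
            rw [hz]
            exact Nat.zero_le _
          · have hxcnt : ms.count x = (b :: t).count x := by
              rw [← pv_skip_count b x (not_lt.mp hx) ms, hms']
            have hb2 := h x
            rw [hxcnt] at hb2
            by_cases hxb : x = b
            · rw [hxb] at hb2 ⊢
              rw [List.count_cons_self, List.count_cons_self] at hb2
              omega
            · rw [List.count_cons_of_ne (Ne.symm hxb), List.count_cons_of_ne (Ne.symm hxb)] at hb2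
              exact hb2
      · rw [if_neg hbc]
        have hclt : c < b := lt_of_le_of_ne hcb (fun e => hbc e.symm)
        constructor
        · intro h; exact absurd h (by simp)
        · intro h
          have h0 : ms.count c = 0 := by
            rw [← pv_skip_count c c le_rfl ms, hms']
            exact pv_count_lt_head b c t hsp hclt
          have := h c
          rw [h0, List.count_cons_self] at this
          omega

-- ===== VERDICT (by name: the statement is the Claim_ definition above) =====
theorem letterFromMagazine_spec : Claim_equal_letterFromMagazine := by
  intro l m _
  show letterFromMagazine l m = letterFromMagazine_alt l m
  rw [Bool.eq_iff_iff, pv_A_iff]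
  unfold letterFromMagazine_alt
  rw [pv_go_iff _ _
    (by simpa using PySem.List.sorted_pairwise l.toList (fun x => x))
    (by simpa using PySem.List.sorted_pairwise m.toList (fun x => x))]
  constructor
  · intro h x
    rw [(PySem.List.sorted_perm l.toList (fun x => x) false).count_eq,
        (PySem.List.sorted_perm m.toList (fun x => x) false).count_eq]
    exact h x
  · intro h x
    have := h x
    rwa [(PySem.List.sorted_perm l.toList (fun x => x) false).count_eq,
        (PySem.List.sorted_perm m.toList (fun x => x) false).count_eq] at this
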